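-- pv_equiv track=rewrite | github.com/faiyaz106/Text-Summarization- | std_tfidf_centroid_summarizer.py | doc_word_freq
-- ===== SOURCE A (Python) =====
-- def doc_word_freq(cleaned_text):
--     """This return how many times particular word appeared in the document"""
--     doc_freq={}
--     for i in cleaned_text.keys():
--         doc_freq[i]={}
--         for j in cleaned_text[i]:
--             count=0
--             if j not in doc_freq[i].keys():
--                 doc_freq[i][j]=0
--             else:
--                 continue
--             for k in cleaned_text.keys():
--                 if j in cleaned_text[k]:
--                     count=count+1
--                 else:
--                     continue
--             doc_freq[i][j]=count
--     return doc_freq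
-- ===== SOURCE B (Python) =====
-- def doc_word_freq(cleaned_text):
--     """This return how many times particular word appeared in the document"""
--     df = {}
--     for words in cleaned_text.values():
--         for w in set(words):
--             df[w] = df.get(w, 0) + 1
--     return {doc: {w: df[w] for w in dict.fromkeys(words)}
--             for doc, words in cleaned_text.items()}
-- ===== Notes on version B (the rewrite author's own statement) =====
-- stated objective: faster
-- what changed: B builds a document-frequency counter once from per-document word sets and fills each document's dict by lookup, replacing A's rescan of every document for every word occurrence; Pre_ excludes only association lists with duplicate document keys, which do not correspond to any Python dict argument.
import Mathlib
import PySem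

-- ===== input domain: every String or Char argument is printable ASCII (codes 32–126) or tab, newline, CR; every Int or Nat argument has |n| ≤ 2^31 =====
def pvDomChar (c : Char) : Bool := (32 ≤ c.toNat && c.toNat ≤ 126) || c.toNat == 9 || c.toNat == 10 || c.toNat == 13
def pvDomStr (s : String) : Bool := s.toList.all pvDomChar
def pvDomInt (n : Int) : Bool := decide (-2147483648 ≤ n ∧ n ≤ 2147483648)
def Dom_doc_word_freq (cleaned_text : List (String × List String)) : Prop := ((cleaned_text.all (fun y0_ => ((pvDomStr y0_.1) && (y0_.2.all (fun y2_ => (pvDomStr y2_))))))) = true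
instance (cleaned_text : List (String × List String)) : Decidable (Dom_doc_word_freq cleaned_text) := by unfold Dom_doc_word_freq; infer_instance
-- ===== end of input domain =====

-- B replaces A's per-word rescan of every document by a document-frequency counter built once; proved equal on dicts (association lists with distinct keys).

-- ===== PORT A =====
-- literal transliteration of A: for each key i, for each new word j, scan ALL documents counting those containing j
def doc_word_freq (cleaned_text : List (String × List String)) : List (String × List (String × Int)) :=
  ((PySem.Dict.mk cleaned_text).keys.foldl (fun doc_freq i =>
      doc_freq.insert i
        ((((PySem.Dict.mk cleaned_text).get? i).getD []).foldl (fun inner j =>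
            if inner.contains j then inner            -- 'else: continue'
            else                                      -- doc_freq[i][j] = 0, count the docs containing j, doc_freq[i][j] = count
              (inner.insert j 0).insert j
                ((PySem.Dict.mk cleaned_text).keys.foldl (fun count k =>
                  if j ∈ ((PySem.Dict.mk cleaned_text).get? k).getD [] then count + 1 else count) (0 : Int)))
          PySem.Dict.empty))
    (PySem.Dict.empty : PySem.Dict String (PySem.Dict String Int))).items.map (fun p => (p.1, p.2.items))

-- ===== PORT B =====
-- literal transliteration of B: df counts, per word, how many documents contain it; then one lookup pass
def doc_word_freq_alt (cleaned_text : List (String × List String)) : List (String × List (String × Int)) :=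
  let df : PySem.Dict String Int :=
    cleaned_text.foldl (fun df p =>
      (PySem.Set.ofList p.2).foldl (fun df w => df.insert w (df.getD w 0 + 1)) df)
      PySem.Dict.empty
  cleaned_text.map (fun p =>
    (p.1, ((PySem.List.dedup p.2).foldl (fun inner w => inner.insert w (df.getD w 0))
            (PySem.Dict.empty : PySem.Dict String Int)).items))

-- ===== PRECONDITION & SPEC =====
-- Pre_ excludes association lists with duplicate document keys: a Python dict argument collapses them, so neither port's value there is canonical.
def Pre_doc_word_freq (cleaned_text : List (String × List String)) : Prop :=
  (cleaned_text.map Prod.fst).Nodup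
instance (cleaned_text : List (String × List String)) : Decidable (Pre_doc_word_freq cleaned_text) := by unfold Pre_doc_word_freq; infer_instance
def pvWitness_doc_word_freq : (List (String × List String)) :=
  [("d1", ["a", "b", "a"]), ("d2", ["b"])]

def Spec_doc_word_freq (cleaned_text : List (String × List String)) (out : List (String × List (String × Int))) : Prop := out = doc_word_freq_alt cleaned_text
instance (cleaned_text : List (String × List String)) (out : List (String × List (String × Int))) : Decidable (Spec_doc_word_freq cleaned_text out) := by unfold Spec_doc_word_freq; infer_instance

-- ===== CLAIM (what is proved, stated in full; the proofs are below) =====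
def Claim_equal_doc_word_freq : Prop := ∀ (cleaned_text : List (String × List String)), Dom_doc_word_freq cleaned_text → Pre_doc_word_freq cleaned_text → Spec_doc_word_freq cleaned_text (doc_word_freq cleaned_text)

-- ===== LEMMAS AND PROOFS =====

-- first-occurrence dedup with an explicit 'seen' accumulator: the common shape of both inner loops
def pvSeed (g : String → String × Int) : List String → List String → List (String × Int)
  | [], _ => []
  | j :: ws, seen => if j ∈ seen then pvSeed g ws seen else g j :: pvSeed g ws (j :: seen)

theorem pvSeed_congr_seen (g : String → String × Int) (ws : List String)
    (s t : List String) (h : ∀ x, x ∈ s ↔ x ∈ t) : pvSeed g ws s = pvSeed g ws t := by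
  induction ws generalizing s t with
  | nil => rfl
  | cons j ws ih =>
      simp only [pvSeed]
      by_cases hj : j ∈ s
      · rw [if_pos hj, if_pos ((h j).mp hj)]; exact ih s t h
      · rw [if_neg hj, if_neg (fun hx => hj ((h j).mpr hx))]
        exact congrArg _ (ih (j :: s) (j :: t) (by intro x; simp [h x]))

theorem pvSeed_update (g : String → String × Int) (ws : List String) :
    ∀ seen : List String, (PySem.Set.update seen ws).map g = seen.map g ++ pvSeed g ws seen := by
  induction ws with
  | nil => intro seen; simp [PySem.Set.update, pvSeed]
  | cons j ws ih =>
      intro seen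
      have hupd : PySem.Set.update seen (j :: ws) = PySem.Set.update (PySem.Set.add seen j) ws := by
        simp [PySem.Set.update]
      rw [hupd]
      by_cases hj : j ∈ seen
      · have hadd : PySem.Set.add seen j = seen := by
          simp [PySem.Set.add, PySem.Set.contains, hj]
        rw [hadd, ih seen]
        simp [pvSeed, hj]
      · have hadd : PySem.Set.add seen j = seen ++ [j] := by
          simp [PySem.Set.add, PySem.Set.contains, hj]
        rw [hadd, ih (seen ++ [j])]
        rw [pvSeed_congr_seen g ws (seen ++ [j]) (j :: seen) (by intro x; simp; tauto)]
        simp [pvSeed, hj]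

theorem pvSeed_nil_eq_dedup (g : String → String × Int) (ws : List String) :
    pvSeed g ws [] = (PySem.List.dedup ws).map g := by
  have h := pvSeed_update g ws []
  simpa [PySem.List.dedup_eq_ofList, PySem.Set.ofList_eq_foldl, PySem.Set.update] using h.symm

-- A's dict lookup on a member key, when keys are distinct
theorem pvGet_mk_mem (ct : List (String × List String)) (hnd : (ct.map Prod.fst).Nodup) :
    ∀ p ∈ ct, (PySem.Dict.mk ct).get? p.1 = some p.2 := by
  induction ct with
  | nil => intro p hp; cases hp
  | cons q ct ih =>
      intro p hp
      have hnd' : q.1 ∉ ct.map Prod.fst ∧ (ct.map Prod.fst).Nodup := by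
        rw [List.map_cons, List.nodup_cons] at hnd; exact hnd
      rcases List.mem_cons.mp hp with hp' | hp'
      · subst hp'; rw [PySem.Dict.get?_mk_cons]; simp
      · have hne : q.1 ≠ p.1 := by
          intro h
          exact hnd'.1 (h ▸ List.mem_map_of_mem hp')
        rw [PySem.Dict.get?_mk_cons]
        simp only [beq_iff_eq, if_neg hne]
        exact ih hnd'.2 p hp'

-- A's innermost count equals the document-frequency countP
theorem pvCntA (ct : List (String × List String)) (hnd : (ct.map Prod.fst).Nodup) (j : String) :
    (ct.map Prod.fst).foldl
        (fun count k => if j ∈ ((PySem.Dict.mk ct).get? k).getD [] then count + 1 else count) (0 : Int)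
      = (ct.countP (fun p => decide (j ∈ p.2)) : Int) := by
  rw [List.foldl_map]
  have hcongr := PySem.List.foldl_congr_mem ct
      (fun (count : Int) (p : String × List String) =>
        if j ∈ ((PySem.Dict.mk ct).get? p.1).getD [] then count + 1 else count)
      (fun (count : Int) (p : String × List String) => if j ∈ p.2 then count + 1 else count)
      (0 : Int)
      (by intro acc p hp; simp [pvGet_mk_mem ct hnd p hp])
  rw [hcongr, PySem.List.foldl_ite_add_one]
  simp

-- B's counter lookup equals the same countP
theorem pvCntB (j : String) :
    ∀ (ct : List (String × List String)) (d : PySem.Dict String Int),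
    (ct.foldl (fun df p =>
        (PySem.Set.ofList p.2).foldl (fun df w => df.insert w (df.getD w 0 + 1)) df) d).getD j 0
      = d.getD j 0 + (ct.countP (fun p => decide (j ∈ p.2)) : Int) := by
  intro ct
  induction ct with
  | nil => intro d; simp
  | cons p ct ih =>
      intro d
      simp only [List.foldl_cons]
      rw [ih, PySem.Dict.getD_foldl_insert_add_one]
      have hcnt : ((PySem.Set.ofList p.2).count j : Int) = if j ∈ p.2 then 1 else 0 := by
        by_cases hj : j ∈ p.2
        · rw [if_pos hj]
          have h1 := List.count_eq_one_of_mem (PySem.Set.nodup_ofList p.2)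
            ((PySem.Set.mem_ofList p.2 j).mpr hj)
          simp [h1]
        · rw [if_neg hj]
          have h0 : j ∉ PySem.Set.ofList p.2 := fun h => hj ((PySem.Set.mem_ofList p.2 j).mp h)
          simp [List.count_eq_zero_of_not_mem h0]
      rw [hcnt]
      by_cases hj : j ∈ p.2
      · simp [hj]; ring
      · simp [hj]

-- A's inner loop produces pvSeed
theorem pvInnerA (cnt : String → Int) (ws : List String) :
    ∀ (dd : PySem.Dict String Int),
    (ws.foldl (fun inner j =>
        if inner.contains j then inner
        else (inner.insert j 0).insert j (cnt j)) dd).items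
      = dd.items ++ pvSeed (fun j => (j, cnt j)) ws dd.keys := by
  induction ws with
  | nil => intro dd; simp [pvSeed]
  | cons j ws ih =>
      intro dd
      simp only [List.foldl_cons]
      by_cases hc : dd.contains j = true
      · rw [if_pos hc, ih dd]
        have hj : j ∈ dd.keys := (PySem.Dict.contains_iff_mem_keys dd j).mp hc
        simp [pvSeed, hj]
      · have hc' : dd.contains j = false := by simpa using hc
        rw [if_neg hc, PySem.Dict.insert_insert_self, ih (dd.insert j (cnt j))]
        have hj : j ∉ dd.keys := fun h => by
          simp [(PySem.Dict.contains_iff_mem_keys dd j).mpr h] at hc'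
        rw [PySem.Dict.items_insert_of_not_contains dd _ hc',
            PySem.Dict.keys_insert_of_not_contains dd _ hc']
        rw [pvSeed_congr_seen _ ws (dd.keys ++ [j]) (j :: dd.keys) (by intro x; simp; tauto)]
        simp [pvSeed, hj]

-- ===== VERDICT (by name: the statement is the Claim_ definition above) =====
theorem doc_word_freq_spec : Claim_equal_doc_word_freq := by
  intro ct _ hnd
  unfold Spec_doc_word_freq doc_word_freq doc_word_freq_alt
  have hempty : (PySem.Dict.empty : PySem.Dict String (PySem.Dict String Int)).items = [] := rfl
  have hemptyI : (PySem.Dict.empty : PySem.Dict String Int).items = [] := rfl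
  have hkeys : (PySem.Dict.mk ct).keys = ct.map Prod.fst := by simp [PySem.Dict.keys]
  have hfreshA := PySem.Dict.items_foldl_insert_fresh
      ((PySem.Dict.mk ct).keys) (fun i => i)
      (fun i => (((PySem.Dict.mk ct).get? i).getD []).foldl (fun inner j =>
            if inner.contains j then inner
            else (inner.insert j 0).insert j
              ((PySem.Dict.mk ct).keys.foldl (fun count k =>
                if j ∈ ((PySem.Dict.mk ct).get? k).getD [] then count + 1 else count) (0 : Int)))
          PySem.Dict.empty)
      (PySem.Dict.empty : PySem.Dict String (PySem.Dict String Int))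
      (by intro a _; simp) (by simpa [hkeys] using hnd)
  rw [hfreshA, hempty, List.nil_append, List.map_map, hkeys, List.map_map]
  apply List.map_congr_left
  intro p hp
  have hget : (PySem.Dict.mk ct).get? p.1 = some p.2 := pvGet_mk_mem ct hnd p hp
  simp only [Function.comp, hget, Option.getD_some]
  refine Prod.ext rfl ?_
  -- inner dicts: A's loop vs B's lookup pass, both are pvSeed over dedup
  have hA := pvInnerA (fun j => (ct.map Prod.fst).foldl (fun count k =>
      if j ∈ ((PySem.Dict.mk ct).get? k).getD [] then count + 1 else count) (0 : Int)) p.2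
      PySem.Dict.empty
  simp only [hemptyI, PySem.Dict.keys_empty, List.nil_append] at hA
  dsimp only
  rw [hA, pvSeed_nil_eq_dedup]
  have hfreshB := PySem.Dict.items_foldl_insert_fresh
      (PySem.List.dedup p.2) (fun w => w)
      (fun w => (ct.foldl (fun df q =>
          (PySem.Set.ofList q.2).foldl (fun df w => df.insert w (df.getD w 0 + 1)) df)
          PySem.Dict.empty).getD w 0)
      (PySem.Dict.empty : PySem.Dict String Int)
      (by intro a _; simp) (by simp)
  rw [hfreshB, hemptyI, List.nil_append]
  apply List.map_congr_left
  intro j _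
  dsimp only
  refine Prod.ext rfl ?_
  rw [pvCntA ct hnd j, pvCntB j ct PySem.Dict.empty]
  simp
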